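-- pv_equiv track=rewrite | github.com/kenplix/micro-C-parser | expression_handler/calculator.py | check_brackets_conditions
-- ===== SOURCE A (Python) =====
-- def check_brackets_conditions(nomenclature):
--     op_br_count, cl_br_count = nomenclature.count('('), nomenclature.count(')')
--     nomenclature.insert(0, '(')
--     nomenclature.append(')')
--
--     # fill with zeros for correct parsing of signed expressions
--     i = 0
--     while i < len(nomenclature):
--         if i + 1 < len(nomenclature) and nomenclature[i] == '(' and nomenclature[i + 1] in ('-', '+'):
--             nomenclature.insert(i + 1, '0')
--             i += 2
--         else:
--             i += 1
--
--     def find_couples():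
--         # index brackets
--         brackets_storage = []
--         for index, bracket in enumerate(nomenclature):
--             if bracket in ('(', ')'):
--                 brackets_storage.append((index, bracket))
--
--         pairs_of_brackets = []
--
--         while len(brackets_storage) > 2:
--             for index in range(len(brackets_storage)):
--                 if index + 1 < len(brackets_storage) and \
--                         brackets_storage[index][1] == '(' and brackets_storage[index + 1][1] == ')':
--                     opening_index = brackets_storage[index][0]
--                     closing_index = brackets_storage[index + 1][0]
--                     pairs_of_brackets.append((opening_index, closing_index))
--                     del brackets_storage[index], brackets_storage[index]
--                     break
--         else:
--             pairs_of_brackets.append((brackets_storage[0][0], brackets_storage[1][0]))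
--
--         return pairs_of_brackets
--
--     if op_br_count == cl_br_count:
--         return find_couples()
--     elif op_br_count > cl_br_count:
--         raise SyntaxError(f'you have more opening brackets than closing brackets')
--     else:
--         raise SyntaxError(f'you have more closing brackets than opening brackets')
-- ===== SOURCE B (Python) =====
-- def check_brackets_conditions(nomenclature):
--     # return-value equivalence; replicates A's in-place mutation on the return path
--     op_br_count, cl_br_count = nomenclature.count('('), nomenclature.count(')')
--     if op_br_count > cl_br_count:
--         raise SyntaxError('you have more opening brackets than closing brackets')
--     if op_br_count < cl_br_count:
--         raise SyntaxError('you have more closing brackets than opening brackets')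
--     t = ['('] + nomenclature + [')']
--     padded = []
--     n, i = len(t), 0
--     while i < n:
--         tok = t[i]
--         i += 1
--         padded.append(tok)
--         if tok == '(' and i < n and t[i] in ('-', '+'):
--             padded.append('0')
--     nomenclature[:] = padded
--     pairs = []
--     stack = []
--     for i, tok in enumerate(padded):
--         if tok == '(':
--             stack.append(i)
--         elif tok == ')':
--             pairs.append((stack.pop(), i))
--     return pairs
-- ===== Notes on version B (the rewrite author's own statement) =====
-- stated objective: alternative
-- what changed: replaces A's repeated scan-and-delete passes over the bracket storage (one full rescan per matched pair) with a single left-to-right pass that keeps a stack of open-bracket indices and emits a pair at each closing bracket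
-- outside the precondition, e.g. on check_brackets_conditions([')', ')', '(', '(']): A returns [(0, 1), (4, 5), (2, 3)], B raises IndexError
import Mathlib
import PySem

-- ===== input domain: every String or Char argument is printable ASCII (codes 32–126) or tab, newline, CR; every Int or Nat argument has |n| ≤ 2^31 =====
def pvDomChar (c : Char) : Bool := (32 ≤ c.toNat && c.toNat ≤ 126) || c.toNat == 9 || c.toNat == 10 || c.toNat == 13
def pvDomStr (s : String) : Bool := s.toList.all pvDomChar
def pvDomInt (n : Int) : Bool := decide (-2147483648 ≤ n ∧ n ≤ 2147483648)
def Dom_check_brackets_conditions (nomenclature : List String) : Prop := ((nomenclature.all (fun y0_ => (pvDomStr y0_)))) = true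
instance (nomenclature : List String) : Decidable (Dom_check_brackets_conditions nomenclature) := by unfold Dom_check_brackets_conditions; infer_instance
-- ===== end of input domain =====

-- B replaces A's repeated scan-and-delete over the bracket storage by a single stack pass; the
-- equivalence is about the RETURN value — A mutates `nomenclature` in place, and the Python B
-- replicates that net mutation on its return path (`nomenclature[:] = padded`).

-- ===== PORT A =====
-- Python  «x in ('-', '+')»
def pvIsSign (s : String) : Bool := s == "-" || s == "+"

-- A's while-loop inserting '0' after every '(' that is followed by a sign (in-place, index i)
def pvZeroFillA (lst : List String) (i : Nat) : List String :=
  if h : i < lst.length then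
    if i + 1 < lst.length ∧ lst.getD i "" = "(" ∧ pvIsSign (lst.getD (i + 1) "") = true then
      pvZeroFillA (PySem.List.insert lst ((i : Int) + 1) "0") (i + 2)
    else
      pvZeroFillA lst (i + 1)
  else lst
termination_by lst.length - i
decreasing_by
  · rw [PySem.List.length_insert]; omega
  · omega

-- A's inner `for index in range(...)` with the adjacent-('(',')') test, the two `del`s and the `break`
def pvScanA : List (Int × String) → Option (Int × Int × List (Int × String))
  | (i1, b1) :: (i2, b2) :: rest =>
      if b1 == "(" && b2 == ")" then some (i1, i2, rest)
      else
        match pvScanA ((i2, b2) :: rest) with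
        | some (o, c, rest') => some (o, c, (i1, b1) :: rest')
        | none => none
  | _ => none

-- A's `while len(brackets_storage) > 2: … else: …`; fuel because the Python loop can diverge (outside Pre_)
def pvReduceA : Nat → List (Int × String) → List (Int × Int) → List (Int × Int)
  | 0, _, acc => acc                                   -- fuel exhausted: Python diverges here (outside Pre_)
  | fuel + 1, storage, acc =>
      if storage.length > 2 then
        match pvScanA storage with
        | some (o, c, storage') => pvReduceA fuel storage' (acc ++ [(o, c)])
        | none => acc                                  -- Python diverges here (outside Pre_)
      else
        match storage with
        | a :: b :: _ => acc ++ [(a.1, b.1)]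
        | _ => acc                                     -- Python IndexError; unreachable (sentinels are brackets)

def check_brackets_conditions (nomenclature : List String) : List (Int × Int) :=
  let op_br_count := PySem.List.count nomenclature "("
  let cl_br_count := PySem.List.count nomenclature ")"
  let nom1 := "(" :: (nomenclature ++ [")"])
  let nom2 := pvZeroFillA nom1 0
  if op_br_count = cl_br_count then
    let brackets_storage := (PySem.List.enumerate nom2 0).filter (fun p => p.2 == "(" || p.2 == ")")
    pvReduceA (brackets_storage.length + 1) brackets_storage []
  else []                                              -- Python raises SyntaxError; excluded by Pre_

-- ===== PORT B =====
-- B's `while rest:` pass appending each token and a '0' after '(' followed by a sign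
def pvPadB : List String → List String
  | [] => []
  | tok :: rest =>
      if tok == "(" && (match rest with | b :: _ => pvIsSign b | [] => false) then
        tok :: "0" :: pvPadB rest
      else
        tok :: pvPadB rest

-- B's loop body: push the index of '(', pop-and-emit on ')'
def pvStepB (st : List Int × List (Int × Int)) (p : Int × String) : List Int × List (Int × Int) :=
  if p.2 == "(" then (p.1 :: st.1, st.2)
  else if p.2 == ")" then
    match st.1 with
    | o :: s => (s, st.2 ++ [(o, p.1)])
    | [] => st                                         -- Python: stack.pop() raises IndexError; excluded by Pre_
  else st

def check_brackets_conditions_alt (nomenclature : List String) : List (Int × Int) :=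
  let op_br_count := PySem.List.count nomenclature "("
  let cl_br_count := PySem.List.count nomenclature ")"
  if op_br_count = cl_br_count then
    let padded := pvPadB ("(" :: (nomenclature ++ [")"]))
    ((PySem.List.enumerate padded 0).foldl pvStepB ([], [])).2
  else []                                              -- Python raises SyntaxError; excluded by Pre_

-- ===== PRECONDITION & SPEC =====
-- Pre_ excludes inputs whose bracket counts differ (A raises SyntaxError) and balanced inputs whose
-- bracket sequence dips more than one below zero, on which A either diverges or returns an accidental
-- (closing, opening) pairing while B's stack pop raises IndexError.
def Pre_check_brackets_conditions (nomenclature : List String) : Prop :=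
  (nomenclature.filter (fun s => s == "(" || s == ")")).count "(" =
    (nomenclature.filter (fun s => s == "(" || s == ")")).count ")" ∧
  ∀ k < (nomenclature.filter (fun s => s == "(" || s == ")")).length,
    ((nomenclature.filter (fun s => s == "(" || s == ")")).take k).count ")" ≤
    ((nomenclature.filter (fun s => s == "(" || s == ")")).take k).count "(" + 1
instance (nomenclature : List String) : Decidable (Pre_check_brackets_conditions nomenclature) := by
  unfold Pre_check_brackets_conditions; infer_instance

def pvWitness_check_brackets_conditions : List String := ["(", "-", "1", ")"]

def Spec_check_brackets_conditions (nomenclature : List String) (out : List (Int × Int)) : Prop := out = check_brackets_conditions_alt nomenclature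
instance (nomenclature : List String) (out : List (Int × Int)) : Decidable (Spec_check_brackets_conditions nomenclature out) := by unfold Spec_check_brackets_conditions; infer_instance

-- ===== CLAIM (what is proved, stated in full; the proofs are below) =====
def Claim_equal_check_brackets_conditions : Prop := ∀ (nomenclature : List String), Dom_check_brackets_conditions nomenclature → Pre_check_brackets_conditions nomenclature → Spec_check_brackets_conditions nomenclature (check_brackets_conditions nomenclature)

-- ===== LEMMAS AND PROOFS =====
-- bracket test on the stored tokens
def pvIsBr (s : String) : Bool := s == "(" || s == ")"
def pvOpens (l : List (Int × String)) : Nat := l.countP (fun p => p.2 == "(")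
def pvCloses (l : List (Int × String)) : Nat := l.countP (fun p => p.2 == ")")
-- the storage sequence is properly nested: every prefix has at least as many '(' as ')', totals equal
def pvProper (s : List (Int × String)) : Prop :=
  (∀ l₁ l₂, s = l₁ ++ l₂ → pvCloses l₁ ≤ pvOpens l₁) ∧ pvOpens s = pvCloses s

theorem pvZeroFill_eq_padB (rest done : List String) :
    pvZeroFillA (done ++ rest) done.length = done ++ pvPadB rest := by
  induction rest generalizing done with
  | nil => rw [pvZeroFillA]; simp [pvPadB]
  | cons a rest ih =>
    rw [pvZeroFillA]
    have hlen : done.length < (done ++ a :: rest).length := by simp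
    rw [dif_pos hlen]
    have hgi : (done ++ a :: rest).getD done.length "" = a := by
      simp [List.getD_eq_getElem?_getD]
    cases rest with
    | nil =>
      have hno : ¬ (done.length + 1 < (done ++ [a]).length ∧ (done ++ [a]).getD done.length "" = "(" ∧ pvIsSign ((done ++ [a]).getD (done.length + 1) "") = true) := by
        simp
      rw [if_neg hno]
      have : done ++ [a] = (done ++ [a]) ++ [] := by simp
      rw [show done.length + 1 = (done ++ [a]).length by simp]
      have := ih (done := done ++ [a])
      simp only [List.append_nil] at this
      rw [this]
      simp [pvPadB]
    | cons b rest' =>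
      have hg1 : (done ++ a :: b :: rest').getD (done.length + 1) "" = b := by
        have : (done ++ a :: b :: rest') = (done ++ [a]) ++ b :: rest' := by simp
        rw [this]
        rw [show done.length + 1 = (done ++ [a]).length by simp]
        simp [List.getD_eq_getElem?_getD]
      by_cases hs : a = "(" ∧ pvIsSign b = true
      · have hc : done.length + 1 < (done ++ a :: b :: rest').length ∧ (done ++ a :: b :: rest').getD done.length "" = "(" ∧ pvIsSign ((done ++ a :: b :: rest').getD (done.length + 1) "") = true := by
          refine ⟨by simp, by rw [hgi]; exact hs.1, by rw [hg1]; exact hs.2⟩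
        rw [if_pos hc]
        have hins : PySem.List.insert (done ++ a :: b :: rest') ((done.length : Int) + 1) "0" = (done ++ [a, "0"]) ++ b :: rest' := by
          have h1 : ((done.length : Int) + 1) = ((done.length + 1 : Nat) : Int) := by push_cast; ring
          rw [h1, PySem.List.insert_natCast _ _ _ (by simp)]
          have ht : List.take (done.length + 1) (done ++ a :: b :: rest') = done ++ [a] := by
            have := List.take_length_add_append (l₁ := done) (l₂ := a :: b :: rest') 1
            simpa using this
          have hd : List.drop (done.length + 1) (done ++ a :: b :: rest') = b :: rest' := by
            exact List.drop_length_add_append (l₁ := done) (l₂ := a :: b :: rest') 1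
          rw [ht, hd]; simp
        rw [hins]
        rw [show done.length + 2 = (done ++ [a, "0"]).length by simp]
        rw [ih (done := done ++ [a, "0"])]
        have hpb : pvPadB (a :: b :: rest') = a :: "0" :: pvPadB (b :: rest') := by
          rw [pvPadB]
          rw [if_pos (by simp [hs.1, hs.2])]
        rw [hpb]; simp
      · have hc : ¬ (done.length + 1 < (done ++ a :: b :: rest').length ∧ (done ++ a :: b :: rest').getD done.length "" = "(" ∧ pvIsSign ((done ++ a :: b :: rest').getD (done.length + 1) "") = true) := by
          rw [hgi, hg1]
          intro ⟨_, h2, h3⟩; exact hs ⟨h2, h3⟩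
        rw [if_neg hc]
        have heq : done ++ a :: b :: rest' = (done ++ [a]) ++ b :: rest' := by simp
        rw [heq, show done.length + 1 = (done ++ [a]).length by simp]
        rw [ih (done := done ++ [a])]
        have hpb : pvPadB (a :: b :: rest') = a :: pvPadB (b :: rest') := by
          rw [pvPadB]
          rw [if_neg (by intro h; simp at h; exact hs ⟨h.1, h.2⟩)]
        rw [hpb]; simp

theorem pvScanA_first (o c : Int) (R : List (Int × String)) :
    ∀ P, (∀ p ∈ P, p.2 = "(") → pvScanA (P ++ (o, "(") :: (c, ")") :: R) = some (o, c, P ++ R) := by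
  intro P
  induction P with
  | nil => intro _; simp [pvScanA]
  | cons p P' ih =>
    intro hP
    have hp : p.2 = "(" := hP p (by simp)
    have ih' := ih (fun x hx => hP x (List.mem_cons_of_mem _ hx))
    obtain ⟨pi, ps⟩ := p
    simp only at hp
    subst hp
    cases P' with
    | nil => simp [pvScanA]
    | cons q Q =>
      obtain ⟨qi, qs⟩ := q
      have hq : qs = "(" := by have := hP (qi, qs) (by simp); simpa using this
      subst hq
      simp only [List.cons_append] at ih' ⊢
      rw [pvScanA]
      simp [ih']

theorem foldl_pvStepB_opens (P : List (Int × String)) :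
    ∀ (L : List (Int × String)) (st : List Int) (acc : List (Int × Int)), (∀ p ∈ P, p.2 = "(") →
      List.foldl pvStepB (st, acc) (P ++ L) =
      List.foldl pvStepB ((P.map Prod.fst).reverse ++ st, acc) L := by
  induction P with
  | nil => intro L st acc _; simp
  | cons p P' ih =>
    intro L st acc hP
    have hp : p.2 = "(" := hP p (by simp)
    rw [List.cons_append, List.foldl_cons]
    have hstep : pvStepB (st, acc) p = (p.1 :: st, acc) := by simp [pvStepB, hp]
    rw [hstep, ih L (p.1 :: st) acc (fun x hx => hP x (by simp [hx]))]
    have hst : ((p :: P').map Prod.fst).reverse ++ st = (P'.map Prod.fst).reverse ++ p.1 :: st := by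
      simp
    rw [hst]

theorem pvDecompAux (s : List (Int × String)) :
    ∀ (o₀ : Int), (∀ p ∈ s, p.2 = "(" ∨ p.2 = ")") → (∃ q ∈ s, q.2 = ")") →
    ∃ P o c R, (o₀, "(") :: s = P ++ (o, "(") :: (c, ")") :: R ∧ ∀ p ∈ P, p.2 = "(" := by
  induction s with
  | nil => intro o₀ _ h; simp at h
  | cons q s' ih =>
    intro o₀ hbr hex
    by_cases hq : q.2 = ")"
    · refine ⟨[], o₀, q.1, s', ?_, by simp⟩
      have : q = (q.1, ")") := by rw [← hq]
      rw [this]; simp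
    · have hq' : q.2 = "(" := (hbr q (by simp)).resolve_right hq
      have hex' : ∃ r ∈ s', r.2 = ")" := by
        obtain ⟨r, hr, hr2⟩ := hex
        rcases List.mem_cons.mp hr with h | h
        · subst h; exact absurd hr2 hq
        · exact ⟨r, h, hr2⟩
      obtain ⟨P, o, c, R, heq, hPall⟩ := ih q.1 (fun x hx => hbr x (by simp [hx])) hex'
      refine ⟨(o₀, "(") :: P, o, c, R, ?_, ?_⟩
      · rw [List.cons_append, ← heq]
        have : q = (q.1, "(") := by rw [← hq']
        rw [this]
      · intro x hx
        rcases List.mem_cons.mp hx with h | h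
        · subst h; rfl
        · exact hPall x h

theorem pvDecomp (s : List (Int × String)) (hbr : ∀ p ∈ s, p.2 = "(" ∨ p.2 = ")")
    (hne : s ≠ []) (hp : pvProper s) :
    ∃ P o c R, s = P ++ (o, "(") :: (c, ")") :: R ∧ ∀ p ∈ P, p.2 = "(" := by
  obtain ⟨a, s', rfl⟩ := List.exists_cons_of_ne_nil hne
  have ha : a.2 = "(" := by
    rcases hbr a (by simp) with h | h
    · exact h
    · exfalso
      have := hp.1 [a] s' rfl
      simp [pvCloses, pvOpens, h] at this
  have hex : ∃ r ∈ s', r.2 = ")" := by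
    by_contra hno
    simp only [not_exists, not_and] at hno
    have hcl : pvCloses s' = 0 := by
      unfold pvCloses
      rw [List.countP_eq_zero]
      intro x hx
      simpa using hno x hx
    have htot := hp.2
    unfold pvOpens pvCloses at htot hcl
    simp only [List.countP_cons] at htot
    simp [ha, hcl] at htot
  obtain ⟨P, o, c, R, heq, hPall⟩ := pvDecompAux s' a.1 (fun x hx => hbr x (by simp [hx])) hex
  refine ⟨P, o, c, R, ?_, hPall⟩
  rw [← heq]
  have : a = (a.1, "(") := by rw [← ha]
  rw [this]

theorem pvProper_remove (P R : List (Int × String)) (o c : Int)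
    (hp : pvProper (P ++ (o, "(") :: (c, ")") :: R)) : pvProper (P ++ R) := by
  constructor
  · intro l₁ l₂ hsplit
    rcases List.append_eq_append_iff.mp hsplit with ⟨as, hl₁, hR⟩ | ⟨bs, hP, hl₂⟩
    · -- l₁ = P ++ as, R = as ++ l₂
      subst hl₁
      have := hp.1 (P ++ (o, "(") :: (c, ")") :: as) l₂ (by rw [hR]; simp)
      unfold pvCloses pvOpens at this ⊢
      simp only [List.countP_append, List.countP_cons] at this ⊢
      simp at this
      omega
    · -- P = l₁ ++ bs
      subst hP
      have := hp.1 l₁ (bs ++ (o, "(") :: (c, ")") :: R) (by simp)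
      exact this
  · have := hp.2
    unfold pvCloses pvOpens at this ⊢
    simp only [List.countP_append, List.countP_cons] at this ⊢
    simp at this ⊢
    omega

theorem pvReduceA_succ (fuel : Nat) (storage : List (Int × String)) (acc : List (Int × Int)) :
    pvReduceA (fuel + 1) storage acc =
      (if storage.length > 2 then
        match pvScanA storage with
        | some (o, c, storage') => pvReduceA fuel storage' (acc ++ [(o, c)])
        | none => acc
      else
        match storage with
        | a :: b :: _ => acc ++ [(a.1, b.1)]
        | _ => acc) := rfl

theorem pvPadB_cons (a : String) (t : List String) :
    pvPadB (a :: t) =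
      (if a == "(" && (match t with | b :: _ => pvIsSign b | [] => false) then
        a :: "0" :: pvPadB t
      else
        a :: pvPadB t) := rfl

theorem pvCore (n : Nat) :
    ∀ (s : List (Int × String)) (st : List Int) (acc : List (Int × Int)) (fuel : Nat),
      s.length ≤ n → (∀ p ∈ s, p.2 = "(" ∨ p.2 = ")") → pvProper s → s.length < fuel →
      pvReduceA fuel s acc = (List.foldl pvStepB (st, acc) s).2 := by
  induction n with
  | zero =>
    intro s st acc fuel hlen _ _ hfuel
    have hs : s = [] := List.eq_nil_of_length_eq_zero (Nat.le_zero.mp hlen)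
    subst hs
    cases fuel with
    | zero => omega
    | succ f => simp [pvReduceA]
  | succ n ih =>
    intro s st acc fuel hlen hbr hp hfuel
    by_cases hne : s = []
    · subst hne
      cases fuel with
      | zero => omega
      | succ f => simp [pvReduceA]
    · obtain ⟨P, o, c, R, rfl, hPall⟩ := pvDecomp s hbr hne hp
      cases fuel with
      | zero => omega
      | succ f =>
        rw [pvReduceA_succ]
        by_cases hbig : (P ++ (o, "(") :: (c, ")") :: R).length > 2
        · rw [if_pos hbig, pvScanA_first o c R P hPall]
          show pvReduceA f (P ++ R) (acc ++ [(o, c)]) =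
            (List.foldl pvStepB (st, acc) (P ++ (o, "(") :: (c, ")") :: R)).2
          have hbr' : ∀ p ∈ P ++ R, p.2 = "(" ∨ p.2 = ")" := by
            intro x hx
            apply hbr
            rcases List.mem_append.mp hx with h | h
            · exact List.mem_append.mpr (Or.inl h)
            · simp [h]
          have hlen' : (P ++ R).length ≤ n := by
            simp only [List.length_append, List.length_cons] at hlen ⊢
            omega
          have hfuel' : (P ++ R).length < f := by
            simp only [List.length_append, List.length_cons] at hbig hfuel ⊢
            omega
          rw [ih (P ++ R) st (acc ++ [(o, c)]) f hlen' hbr' (pvProper_remove P R o c hp) hfuel']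
          rw [foldl_pvStepB_opens P _ st acc hPall, foldl_pvStepB_opens P _ st (acc ++ [(o, c)]) hPall]
          simp [pvStepB]
        · rw [if_neg hbig]
          have hPR : P = [] ∧ R = [] := by
            constructor <;>
              (apply List.eq_nil_of_length_eq_zero;
               simp only [List.length_append, List.length_cons] at hbig; omega)
          obtain ⟨hP0, hR0⟩ := hPR
          subst hP0; subst hR0
          simp [pvStepB]

theorem map_snd_filter_enumerate (l : List String) :
    ∀ (s : Int) (p : String → Bool),
      (((PySem.List.enumerate l s).filter (fun q => p q.2)).map Prod.snd) = l.filter p := by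
  induction l with
  | nil => intro s p; simp [PySem.List.enumerate_nil]
  | cons a l ih =>
    intro s p
    rw [PySem.List.enumerate_cons]
    by_cases hpa : p a = true
    · simp [hpa, ih]
    · simp [hpa, ih]

theorem filter_padB (t : List String) :
    (pvPadB t).filter (fun s => s == "(" || s == ")") = t.filter (fun s => s == "(" || s == ")") := by
  induction t with
  | nil => simp [pvPadB]
  | cons a t ih =>
    rw [pvPadB_cons]
    split <;> (try split) <;> simp_all [List.filter_cons, pvPadB]

theorem pvCloses_map (l : List (Int × String)) :
    pvCloses l = (l.map Prod.snd).countP (fun s => s == ")") := by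
  simp [pvCloses, List.countP_map]
  rfl

theorem pvOpens_map (l : List (Int × String)) :
    pvOpens l = (l.map Prod.snd).countP (fun s => s == "(") := by
  simp [pvOpens, List.countP_map]
  rfl

theorem pvPrefix_bound (b u v : List String)
    (hcnt : b.count "(" = b.count ")")
    (hdip : ∀ k < b.length, (b.take k).count ")" ≤ (b.take k).count "(" + 1)
    (hsplit : u ++ v = "(" :: (b ++ [")"])) :
    u.countP (fun s => s == ")") ≤ u.countP (fun s => s == "(") := by
  simp only [List.count_eq_countP] at hcnt hdip
  cases u with
  | nil => simp
  | cons x w =>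
    rw [List.cons_append] at hsplit
    obtain ⟨hx, hwv⟩ := List.cons_eq_cons.mp hsplit
    subst hx
    have hkey : w.countP (fun s => s == ")") ≤ w.countP (fun s => s == "(") + 1 := by
      rcases List.append_eq_append_iff.mp hwv with ⟨as, hb, hv⟩ | ⟨cs, hw, hcv⟩
      · cases as with
        | nil =>
          rw [List.append_nil] at hb
          rw [← hb]
          omega
        | cons a0 as' =>
          have hwtake : b.take w.length = w := by rw [hb, List.take_left]
          have hlt : w.length < b.length := by rw [hb]; simp
          have := hdip w.length hlt
          rw [hwtake] at this
          exact this
      · cases cs with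
        | nil =>
          rw [List.append_nil] at hw
          rw [hw]
          omega
        | cons c0 cs' =>
          have h1 : c0 = ")" ∧ cs' ++ v = [] := by
            have := hcv.symm
            rw [List.cons_append] at this
            exact List.cons_eq_cons.mp this
          have h2 : cs' = [] := by
            have := h1.2
            simpa using (List.append_eq_nil_iff.mp this).1
          subst h2
          rw [hw, h1.1]
          simp only [List.countP_append, List.countP_cons]
          simp
          omega
    simp only [List.countP_cons]
    simp
    omega

-- ===== VERDICT (by name: the statement is the Claim_ definition above) =====
theorem check_brackets_conditions_spec : Claim_equal_check_brackets_conditions := by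
  intro nom _ hpre
  unfold Pre_check_brackets_conditions at hpre
  obtain ⟨hcnt, hdip⟩ := hpre
  unfold Spec_check_brackets_conditions check_brackets_conditions check_brackets_conditions_alt
  by_cases hc : PySem.List.count nom "(" = PySem.List.count nom ")"
  · simp only [if_pos hc]
    have hpad : pvZeroFillA ("(" :: (nom ++ [")"])) 0 = pvPadB ("(" :: (nom ++ [")"])) := by
      simpa using pvZeroFill_eq_padB ("(" :: (nom ++ [")"])) []
    rw [hpad]
    set padded := pvPadB ("(" :: (nom ++ [")"])) with hpaddef
    set storage := (PySem.List.enumerate padded 0).filter (fun p => p.2 == "(" || p.2 == ")") with hstdef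
    have hfun : (fun (acc : List Int × List (Int × Int)) (x : Int × String) =>
        if (x.2 == "(" || x.2 == ")") = true then pvStepB acc x else acc) = pvStepB := by
      funext acc x
      by_cases hx : (x.2 == "(" || x.2 == ")") = true
      · rw [if_pos hx]
      · rw [if_neg hx]
        simp only [Bool.or_eq_true, beq_iff_eq, not_or] at hx
        simp [pvStepB, hx.1, hx.2]
    have hfold : (PySem.List.enumerate padded 0).foldl pvStepB (([] : List Int), ([] : List (Int × Int)))
        = storage.foldl pvStepB ([], []) := by
      rw [hstdef, ← PySem.List.foldl_if_eq_foldl_filter (fun p : Int × String => p.2 == "(" || p.2 == ")") pvStepB, hfun]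
    rw [hfold]
    have hmapsnd : storage.map Prod.snd =
        "(" :: (nom.filter (fun s => s == "(" || s == ")") ++ [")"]) := by
      calc storage.map Prod.snd
          = padded.filter (fun s => s == "(" || s == ")") :=
            map_snd_filter_enumerate padded 0 (fun s => s == "(" || s == ")")
        _ = ("(" :: (nom ++ [")"])).filter (fun s => s == "(" || s == ")") := filter_padB _
        _ = "(" :: (nom.filter (fun s => s == "(" || s == ")") ++ [")"]) := by
            simp [List.filter_append]
    have hbr : ∀ p ∈ storage, p.2 = "(" ∨ p.2 = ")" := by
      intro p hp
      have := (List.mem_filter.mp hp).2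
      simpa using this
    have hproper : pvProper storage := by
      constructor
      · intro l₁ l₂ hsplit
        have hm : (l₁.map Prod.snd) ++ (l₂.map Prod.snd) =
            "(" :: (nom.filter (fun s => s == "(" || s == ")") ++ [")"]) := by
          rw [← List.map_append, ← hsplit, hmapsnd]
        rw [pvCloses_map, pvOpens_map]
        exact pvPrefix_bound (nom.filter (fun s => s == "(" || s == ")")) _ _ hcnt hdip hm
      · rw [pvOpens_map, pvCloses_map, hmapsnd]
        simp only [List.count_eq_countP] at hcnt
        simp only [List.countP_cons, List.countP_append]
        simp [hcnt]
    exact pvCore storage.length storage [] [] (storage.length + 1) le_rfl hbr hproper (Nat.lt_succ_self _)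
  · simp only [if_neg hc]
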